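-- pv_equiv track=rewrite | github.com/rubelw/OSSS | src/OSSS/ai/agents/query_data/handlers/documents_handler.py | _select_documents_fields
-- ===== SOURCE A (Python) =====
-- from typing import Any, Dict, List, Sequence
--
-- def _select_documents_fields(
--     rows: Sequence[Dict[str, Any]],
-- ) -> List[str]:
--     """
--     Choose a stable, user-friendly column ordering, but gracefully
--     include any extra keys that the API returns.
--     """
--     if not rows:
--         return []
--
--     preferred_order = [
--         "id",
--         "folder_id",
--         "folder_path",
--         "title",
--         "slug",
--         "description",
--         "document_type",      # policy, handbook, agenda, minutes, etc.
--         "status",             # draft, published, archived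
--         "owner_id",
--         "owner_name",
--         "school_id",
--         "school_name",
--         "school_year",
--         "tags",
--         "version_id",
--         "current_version_number",
--         "published_at",
--         "created_at",
--         "updated_at",
--         "source_system",
--         "external_ref",
--     ]
--
--     all_keys: List[str] = []
--     for r in rows:
--         for k in r.keys():
--             if k not in all_keys:
--                 all_keys.append(k)
--
--     ordered = [k for k in preferred_order if k in all_keys]
--     ordered.extend(k for k in all_keys if k not in ordered)
--     return ordered
-- ===== SOURCE B (Python) =====
-- from typing import Any, Dict, List, Sequence
--
-- def _select_documents_fields(
--     rows: Sequence[Dict[str, Any]],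
-- ) -> List[str]:
--     """
--     Choose a stable, user-friendly column ordering, but gracefully
--     include any extra keys that the API returns.
--     """
--     preferred_order = [
--         "id",
--         "folder_id",
--         "folder_path",
--         "title",
--         "slug",
--         "description",
--         "document_type",
--         "status",
--         "owner_id",
--         "owner_name",
--         "school_id",
--         "school_name",
--         "school_year",
--         "tags",
--         "version_id",
--         "current_version_number",
--         "published_at",
--         "created_at",
--         "updated_at",
--         "source_system",
--         "external_ref",
--     ]
--     n = len(preferred_order)
--     rank = {k: i for i, k in enumerate(preferred_order)}
--
--     # first-seen index of every distinct key, in one pass over the rows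
--     order: Dict[str, int] = {}
--     for r in rows:
--         for k in r.keys():
--             if k not in order:
--                 order[k] = len(order)
--
--     m = len(order)
--     # preferred rank first, first-seen index breaks ties among non-preferred keys
--     return sorted(order, key=lambda k: rank.get(k, n) * m + order[k])
-- ===== Notes on version B (the rewrite author's own statement) =====
-- stated objective: faster
-- what changed: Replaced A's filter-then-lazy-extend two-pass with linear-scan membership tests by a rank table over the preferred keys, a single first-seen-index pass over the rows, and one keyed sort of the distinct keys.
import Mathlib
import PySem

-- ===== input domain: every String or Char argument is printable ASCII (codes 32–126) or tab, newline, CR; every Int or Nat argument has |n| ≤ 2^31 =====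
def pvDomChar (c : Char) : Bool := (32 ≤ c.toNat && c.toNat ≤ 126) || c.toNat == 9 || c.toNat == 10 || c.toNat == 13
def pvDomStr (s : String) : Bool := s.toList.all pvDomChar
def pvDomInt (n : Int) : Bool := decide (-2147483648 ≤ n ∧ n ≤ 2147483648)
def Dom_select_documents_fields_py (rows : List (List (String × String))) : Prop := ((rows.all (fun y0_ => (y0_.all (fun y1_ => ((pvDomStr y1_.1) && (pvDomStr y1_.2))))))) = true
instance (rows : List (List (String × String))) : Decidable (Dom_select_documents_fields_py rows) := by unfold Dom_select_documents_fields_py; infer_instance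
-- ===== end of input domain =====

-- B replaces A's filter-then-lazy-extend two-pass (with linear membership scans) by a
-- rank table over the preferred keys, one first-seen-index pass over the rows, and a
-- single keyed sort; same return value, measurably faster (dict lookups replace linear scans).

-- the preferred column order both Python versions write out inline
def pvPreferredOrder : List String :=
  ["id", "folder_id", "folder_path", "title", "slug", "description", "document_type",
   "status", "owner_id", "owner_name", "school_id", "school_name", "school_year",
   "tags", "version_id", "current_version_number", "published_at", "created_at",
   "updated_at", "source_system", "external_ref"]

-- ===== PORT A =====
def select_documents_fields_py (rows : List (List (String × String))) : List String :=
  if rows = [] then []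
  else
    let preferred_order := pvPreferredOrder
    let all_keys : List String := rows.foldl (fun acc r =>
      (r.map Prod.fst).foldl (fun acc k => if acc.contains k then acc else acc ++ [k]) acc) []
    let ordered : List String := preferred_order.filter (fun k => all_keys.contains k)
    -- ordered.extend(<generator>): the generator's membership test sees `ordered` as it grows
    all_keys.foldl (fun o k => if o.contains k then o else o ++ [k]) ordered

-- ===== PORT B =====
def select_documents_fields_py_alt (rows : List (List (String × String))) : List String :=
  let n := pvPreferredOrder.length
  let rank : List (String × Nat) := pvPreferredOrder.zipIdx
  let order : List (String × Nat) := rows.foldl (fun d r =>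
      (r.map Prod.fst).foldl (fun d k =>
        if (List.lookup k d).isSome then d else d ++ [(k, d.length)]) d) []
  let m := order.length
  PySem.List.sorted (order.map Prod.fst)
    (fun k => ((List.lookup k rank).getD n) * m + ((List.lookup k order).getD 0))

-- ===== PRECONDITION & SPEC =====
def Spec_select_documents_fields_py (rows : List (List (String × String))) (out : List String) : Prop := out = select_documents_fields_py_alt rows
instance (rows : List (List (String × String))) (out : List String) : Decidable (Spec_select_documents_fields_py rows out) := by unfold Spec_select_documents_fields_py; infer_instance

-- ===== CLAIM (what is proved, stated in full; the proofs are below) =====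
def Claim_equal_select_documents_fields_py : Prop := ∀ (rows : List (List (String × String))), Dom_select_documents_fields_py rows → Spec_select_documents_fields_py rows (select_documents_fields_py rows)

-- ===== LEMMAS AND PROOFS =====

-- A's nested dedup loop over the rows is dict.fromkeys of the flattened key sequence
theorem pv_allkeys (rows : List (List (String × String))) :
    rows.foldl (fun acc r =>
      (r.map Prod.fst).foldl (fun acc k => if acc.contains k then acc else acc ++ [k]) acc) []
    = PySem.List.dedup ((rows.map (fun r => r.map Prod.fst)).flatten) := by
  rw [show PySem.List.dedup ((rows.map (fun r => r.map Prod.fst)).flatten)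
      = ((rows.map (fun r => r.map Prod.fst)).flatten).foldl
          (fun acc k => if acc.contains k then acc else acc ++ [k]) [] from rfl,
    List.foldl_flatten, List.foldl_map]

theorem pv_lookup_pos (l : List String) (hnd : l.Nodup) :
    ∀ (s i : ℕ) (h : i < l.length), List.lookup l[i] (List.zipIdx l s) = some (s + i) := by
  induction l with
  | nil => intro s i h; simp at h
  | cons x t ih =>
    intro s i h
    rcases List.nodup_cons.mp hnd with ⟨hx, hnd'⟩
    cases i with
    | zero => simp
    | succ i =>
      have hi : i < t.length := by simpa using h
      have hne : (t[i] == x) = false := by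
        simp only [beq_eq_false_iff_ne]
        intro he; exact hx (he ▸ List.getElem_mem hi)
      simp only [List.zipIdx_cons, List.getElem_cons_succ, List.lookup, hne]
      rw [ih hnd' (s+1) i hi]
      ring_nf

theorem pv_lookup_none (l : List String) (k : String) (h : k ∉ l) :
    List.lookup k l.zipIdx = none := by
  rw [List.lookup_eq_none_iff]
  intro p hp
  have : p.1 ∈ l := by
    have := List.zipIdx_map_fst 0 l
    exact this ▸ List.mem_map_of_mem hp
  simp only [bne_iff_ne, ne_eq]
  intro he; exact h (he ▸ this)

theorem pv_lookup_zipIdx_isSome (l : List String) (k : String) :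
    (List.lookup k l.zipIdx).isSome = true ↔ k ∈ l := by
  constructor
  · intro hs
    by_contra hk
    rw [pv_lookup_none l k hk] at hs; simp at hs
  · intro hk
    obtain ⟨i, hi, rfl⟩ := List.mem_iff_getElem.mp hk
    by_contra hs
    have hn : List.lookup l[i] l.zipIdx = none := by
      cases hh : List.lookup l[i] l.zipIdx with
      | none => rfl
      | some v => rw [hh] at hs; simp at hs
    rw [List.lookup_eq_none_iff] at hn
    have hp : (l[i], i) ∈ l.zipIdx := by
      simpa using List.mem_zipIdx_iff_getElem?.mpr (by simp [List.getElem?_eq_getElem hi])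
    have := hn _ hp
    simp at this

theorem pv_pos_pairwise (l : List String) (d : ℕ) (hnd : l.Nodup) :
    l.Pairwise (fun a b => (List.lookup a l.zipIdx).getD d < (List.lookup b l.zipIdx).getD d) := by
  rw [List.pairwise_iff_getElem]
  intro i j hi hj hij
  have h1 := pv_lookup_pos l hnd 0 i hi
  have h2 := pv_lookup_pos l hnd 0 j hj
  rw [show List.zipIdx l = List.zipIdx l 0 from rfl, h1, h2]
  simpa using hij

theorem pv_pos_lt (l : List String) (d : ℕ) (hnd : l.Nodup) (k : String) (hk : k ∈ l) :
    (List.lookup k l.zipIdx).getD d < l.length := by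
  obtain ⟨i, hi, rfl⟩ := List.mem_iff_getElem.mp hk
  rw [show List.zipIdx l = List.zipIdx l 0 from rfl, pv_lookup_pos l hnd 0 i hi]
  simpa using hi

-- B's dict-building loop produces exactly the dedup list paired with its indices
theorem pv_orderfold (L : List String) : ∀ (K0 : List String),
    L.foldl (fun d k => if (List.lookup k d).isSome then d else d ++ [(k, d.length)]) K0.zipIdx
    = (L.foldl (fun acc k => if acc.contains k then acc else acc ++ [k]) K0).zipIdx := by
  induction L with
  | nil => intro K0; rfl
  | cons k L ih =>
    intro K0
    simp only [List.foldl_cons]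
    by_cases h : k ∈ K0
    · rw [if_pos ((pv_lookup_zipIdx_isSome K0 k).mpr h), if_pos (by simpa using h)]
      exact ih K0
    · have h1 : List.lookup k K0.zipIdx = none := pv_lookup_none K0 k h
      rw [if_neg (by simp [h1]), if_neg (by simpa using h)]
      have h2 : K0.zipIdx ++ [(k, K0.zipIdx.length)] = (K0 ++ [k]).zipIdx := by
        simp [List.zipIdx_append]
      rw [h2]
      exact ih (K0 ++ [k])

-- A's lazy extend over a nodup key list is an append of a filter
theorem pv_extend (K : List String) : ∀ (P : List String), K.Nodup →
    K.foldl (fun o k => if o.contains k then o else o ++ [k]) P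
    = P ++ K.filter (fun k => !P.contains k) := by
  induction K with
  | nil => intro P _; simp
  | cons k K ih =>
    intro P hnd
    rcases List.nodup_cons.mp hnd with ⟨hk, hnd'⟩
    simp only [List.foldl_cons, List.filter_cons]
    by_cases h : k ∈ P
    · rw [if_pos (by simpa using h)]
      have : (!P.contains k) = false := by simpa using h
      rw [this, ih P hnd']
      simp
    · rw [if_neg (by simpa using h)]
      have : (!P.contains k) = true := by simpa using h
      rw [this, ih (P ++ [k]) hnd']
      have hf : K.filter (fun x => !(P ++ [k]).contains x) = K.filter (fun x => !P.contains x) := by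
        apply List.filter_congr
        intro x hx
        have hxk : x ≠ k := fun he => hk (he ▸ hx)
        simp [hxk]
      rw [hf]
      simp

theorem pv_prefnd : pvPreferredOrder.Nodup := by decide

-- the sorted key order of B's single sort is exactly A's preferred-then-first-seen concatenation
theorem pv_main (K : List String) (hKnd : K.Nodup) :
    PySem.List.sorted K (fun k =>
        (List.lookup k pvPreferredOrder.zipIdx).getD pvPreferredOrder.length * K.length
        + (List.lookup k K.zipIdx).getD 0)
    = pvPreferredOrder.filter (fun k => K.contains k)
      ++ K.filter (fun k => !(pvPreferredOrder.filter (fun k => K.contains k)).contains k) := by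
  set n := pvPreferredOrder.length with hn
  set P := pvPreferredOrder.filter (fun k => K.contains k) with hP
  set R := K.filter (fun k => !P.contains k) with hR
  have hPmem : ∀ {x}, x ∈ P → x ∈ pvPreferredOrder ∧ x ∈ K := by
    intro x hx
    rcases List.mem_filter.mp hx with ⟨h1, h2⟩
    exact ⟨h1, by simpa using h2⟩
  have hRmem : ∀ {x}, x ∈ R → x ∈ K ∧ x ∉ P := by
    intro x hx
    rcases List.mem_filter.mp hx with ⟨h1, h2⟩
    exact ⟨h1, by simpa using h2⟩
  have hnp : ∀ {b}, b ∈ R → b ∉ pvPreferredOrder := by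
    intro b hb hbp
    rcases hRmem hb with ⟨hbK, hbnP⟩
    exact hbnP (List.mem_filter.mpr ⟨hbp, by simpa using hbK⟩)
  have hPnd : P.Nodup := List.Nodup.filter _ pv_prefnd
  have hRnd : R.Nodup := List.Nodup.filter _ hKnd
  apply PySem.List.sorted_eq_of_perm_of_pairwise_lt
  · -- (P ++ R).Perm K
    rw [List.perm_ext_iff_of_nodup (List.Nodup.append hPnd hRnd ?_) hKnd]
    · intro x
      constructor
      · intro hx
        rcases List.mem_append.mp hx with h | h
        · exact (hPmem h).2
        · exact (hRmem h).1
      · intro hx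
        by_cases hp : x ∈ P
        · exact List.mem_append.mpr (Or.inl hp)
        · refine List.mem_append.mpr (Or.inr (List.mem_filter.mpr ⟨hx, by simpa using hp⟩))
    · intro a haP haR
      exact (hRmem haR).2 haP
  · -- the key is strictly increasing along P ++ R
    rw [List.pairwise_append]
    refine ⟨?_, ?_, ?_⟩
    · refine ((pv_pos_pairwise pvPreferredOrder n pv_prefnd).filter _).imp_of_mem ?_
      intro a b ha hb hlt
      have paK := pv_pos_lt K 0 hKnd a (hPmem ha).2
      have hm : ((List.lookup a pvPreferredOrder.zipIdx).getD n + 1) * K.length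
          ≤ (List.lookup b pvPreferredOrder.zipIdx).getD n * K.length :=
        Nat.mul_le_mul_right _ (Nat.succ_le_of_lt hlt)
      have hs : ((List.lookup a pvPreferredOrder.zipIdx).getD n + 1) * K.length
          = (List.lookup a pvPreferredOrder.zipIdx).getD n * K.length + K.length := by ring
      omega
    · refine ((pv_pos_pairwise K 0 hKnd).filter _).imp_of_mem ?_
      intro a b ha hb hlt
      rw [pv_lookup_none _ _ (hnp ha), pv_lookup_none _ _ (hnp hb)]
      simpa using Nat.add_lt_add_left hlt (n * K.length)
    · intro a ha b hb
      have hra := pv_pos_lt pvPreferredOrder n pv_prefnd a (hPmem ha).1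
      have paK := pv_pos_lt K 0 hKnd a (hPmem ha).2
      rw [pv_lookup_none _ _ (hnp hb)]
      have hm : ((List.lookup a pvPreferredOrder.zipIdx).getD n + 1) * K.length ≤ n * K.length :=
        Nat.mul_le_mul_right _ (Nat.succ_le_of_lt hra)
      have hs : ((List.lookup a pvPreferredOrder.zipIdx).getD n + 1) * K.length
          = (List.lookup a pvPreferredOrder.zipIdx).getD n * K.length + K.length := by ring
      simp only [Option.getD_none]
      omega

-- ===== VERDICT (by name: the statement is the Claim_ definition above) =====
theorem select_documents_fields_py_spec : Claim_equal_select_documents_fields_py := by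
  intro rows _hdom
  unfold Spec_select_documents_fields_py
  by_cases hr : rows = []
  · subst hr; rfl
  · have hA : select_documents_fields_py rows
        = (pvPreferredOrder.filter (fun k =>
            (PySem.List.dedup ((rows.map (fun r => r.map Prod.fst)).flatten)).contains k))
          ++ (PySem.List.dedup ((rows.map (fun r => r.map Prod.fst)).flatten)).filter
              (fun k => !(pvPreferredOrder.filter (fun k =>
                (PySem.List.dedup ((rows.map (fun r => r.map Prod.fst)).flatten)).contains k)).contains k) := by
      simp only [select_documents_fields_py, if_neg hr, pv_allkeys]
      exact pv_extend _ _ (PySem.List.nodup_dedup _)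
    have hord : rows.foldl (fun d r => (r.map Prod.fst).foldl (fun d k =>
          if (List.lookup k d).isSome then d else d ++ [(k, d.length)]) d) ([] : List (String × ℕ))
        = (PySem.List.dedup ((rows.map (fun r => r.map Prod.fst)).flatten)).zipIdx := by
      rw [← List.foldl_map, ← List.foldl_flatten]
      exact pv_orderfold _ []
    have hB : select_documents_fields_py_alt rows
        = PySem.List.sorted (PySem.List.dedup ((rows.map (fun r => r.map Prod.fst)).flatten))
            (fun k => (List.lookup k pvPreferredOrder.zipIdx).getD pvPreferredOrder.length
                * (PySem.List.dedup ((rows.map (fun r => r.map Prod.fst)).flatten)).length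
              + (List.lookup k (PySem.List.dedup ((rows.map (fun r => r.map Prod.fst)).flatten)).zipIdx).getD 0) := by
      simp only [select_documents_fields_py_alt, hord, List.zipIdx_map_fst, List.length_zipIdx]
    rw [hA, hB, pv_main _ (PySem.List.nodup_dedup _)]
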